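-- pv_equiv track=rewrite | github.com/JacobRyanMac/RedditCanada | redditETL.py | addquote
-- ===== SOURCE A (Python) =====
-- def addquote(s):
--     ls = list(s)
--     i = 0
--     for k in ls:
--         if k == '\'':
--             ls[i] = '\'\''
--         i += 1
--     k = "".join(ls)
--     return k
-- ===== SOURCE B (Python) =====
-- def addquote(s):
--     return "''".join(s.split("'"))
-- ===== Notes on version B (the rewrite author's own statement) =====
-- stated objective: idiomatic
-- what changed: Replaced the per-character scan with index bookkeeping and in-place list mutation by a split on the quote character followed by a join with the doubled quote.
import Mathlib
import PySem

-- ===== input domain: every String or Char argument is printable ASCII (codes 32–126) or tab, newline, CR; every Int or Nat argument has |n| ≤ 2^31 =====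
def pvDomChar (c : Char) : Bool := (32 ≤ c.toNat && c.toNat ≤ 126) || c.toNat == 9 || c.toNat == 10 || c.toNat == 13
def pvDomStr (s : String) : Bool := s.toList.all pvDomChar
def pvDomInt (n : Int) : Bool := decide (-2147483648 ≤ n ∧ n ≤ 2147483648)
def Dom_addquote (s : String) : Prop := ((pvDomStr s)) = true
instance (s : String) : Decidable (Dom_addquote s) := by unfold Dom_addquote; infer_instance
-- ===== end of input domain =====

-- B replaces A's per-character scan with index bookkeeping and list mutation by split-on-quote + join-with-doubled-quote (idiomatic).

-- ===== PORT A =====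
-- the 'for k in ls' loop: each char is replaced by "''" if it is a quote, kept otherwise
def addquoteLoop : List Char → List String
  | [] => []
  | k :: rest => (if k = '\'' then "''" else String.ofList [k]) :: addquoteLoop rest

def addquote (s : String) : String :=
  PySem.Str.join "" (addquoteLoop s.toList)

-- ===== PORT B =====
-- "''".join(s.split("'")); split with the nonempty separator "'" is PySem.Chars.splitOn
def addquote_alt (s : String) : String :=
  PySem.Str.join "''" ((PySem.Chars.splitOn s.toList ['\'']).map String.ofList)

-- ===== PRECONDITION & SPEC =====
def Spec_addquote (s : String) (out : String) : Prop := out = addquote_alt s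
instance (s : String) (out : String) : Decidable (Spec_addquote s out) := by unfold Spec_addquote; infer_instance

-- ===== CLAIM (what is proved, stated in full; the proofs are below) =====
def Claim_equal_addquote : Prop := ∀ (s : String), Dom_addquote s → Spec_addquote s (addquote s)

-- ===== LEMMAS AND PROOFS =====

lemma pvJoinEmptySep (parts : List (List Char)) :
    PySem.Chars.join [] parts = parts.flatten := by
  induction parts with
  | nil => simp [PySem.Chars.join, List.intercalate]
  | cons a t ih =>
    cases t with
    | nil => simp [PySem.Chars.join, List.intercalate]
    | cons b t' =>
      rw [PySem.Chars.join_cons_cons, ih]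
      simp

-- the common normal form: each quote doubled
def pvEsc (l : List Char) : List Char :=
  l.flatMap (fun c => if c = '\'' then ['\'', '\''] else [c])

-- a fuel-free rendering of PySem.Chars.splitOn for the one-char separator '\''
def pvSplit (pre : List Char) : List Char → List (List Char)
  | [] => [pre]
  | c :: rest => if c = '\'' then pre :: pvSplit [] rest else pvSplit (pre ++ [c]) rest

lemma pvSplit_ne_nil (pre l) : pvSplit pre l ≠ [] := by
  induction l generalizing pre with
  | nil => simp [pvSplit]
  | cons c rest ih => by_cases h : c = '\'' <;> simp [pvSplit, h, ih]

lemma splitOn_go_eq (l : List Char) : ∀ (fuel : Nat) (cur : List Char) (acc : List (List Char)),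
    l.length < fuel →
    PySem.Chars.splitOn.go ['\''] fuel l cur acc = acc.reverse ++ pvSplit cur.reverse l := by
  induction l with
  | nil =>
    intro fuel cur acc h
    match fuel, h with
    | fuel + 1, _ => simp [PySem.Chars.splitOn.go, pvSplit]
  | cons c rest ih =>
    intro fuel cur acc h
    match fuel, h with
    | fuel + 1, h =>
      by_cases hc : c = '\''
      · subst hc
        rw [show PySem.Chars.splitOn.go ['\''] (fuel+1) ('\''::rest) cur acc
              = PySem.Chars.splitOn.go ['\''] fuel rest [] (cur.reverse :: acc) by
            simp [PySem.Chars.splitOn.go, List.isPrefixOf]]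
        rw [ih fuel [] (cur.reverse :: acc) (by simpa using h)]
        simp [pvSplit]
      · rw [show PySem.Chars.splitOn.go ['\''] (fuel+1) (c::rest) cur acc
              = PySem.Chars.splitOn.go ['\''] fuel rest (c :: cur) acc by
            simp [PySem.Chars.splitOn.go, List.isPrefixOf, Ne.symm hc]]
        rw [ih fuel (c :: cur) acc (by simpa using h)]
        simp [pvSplit, hc]

lemma splitOn_eq_pvSplit (l : List Char) :
    PySem.Chars.splitOn l ['\''] = pvSplit [] l := by
  rw [PySem.Chars.splitOn, splitOn_go_eq l (l.length + 1) [] [] (by omega)]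
  simp

lemma join_pvSplit (l : List Char) : ∀ pre : List Char,
    PySem.Chars.join ['\'', '\''] (pvSplit pre l) = pre ++ pvEsc l := by
  induction l with
  | nil => intro pre; simp [pvSplit, pvEsc, PySem.Chars.join, List.intercalate]
  | cons c rest ih =>
    intro pre
    by_cases hc : c = '\''
    · subst hc
      obtain ⟨b, t, hbt⟩ : ∃ b t, pvSplit ([] : List Char) rest = b :: t := by
        cases h : pvSplit ([] : List Char) rest with
        | nil => exact absurd h (pvSplit_ne_nil _ _)
        | cons b t => exact ⟨b, t, rfl⟩
      have hihn := ih ([] : List Char)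
      rw [hbt] at hihn
      rw [show pvSplit pre ('\'' :: rest) = pre :: pvSplit [] rest from by simp [pvSplit]]
      rw [hbt, PySem.Chars.join_cons_cons, hihn]
      simp [pvEsc]
    · simp only [pvSplit, if_neg hc]
      rw [ih]
      simp [pvEsc, hc]

lemma addquoteLoop_flatten (l : List Char) :
    ((addquoteLoop l).map String.toList).flatten = pvEsc l := by
  induction l with
  | nil => simp [addquoteLoop, pvEsc]
  | cons c rest ih =>
    by_cases hc : c = '\''
    · simp only [addquoteLoop, if_pos hc, List.map_cons, List.flatten_cons, ih]
      simp [pvEsc, hc]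
    · simp only [addquoteLoop, if_neg hc, List.map_cons, List.flatten_cons, ih]
      simp [pvEsc, hc]

theorem addquote_eq (s : String) : addquote s = addquote_alt s := by
  unfold addquote addquote_alt PySem.Str.join
  congr 1
  rw [show ("" : String).toList = [] from rfl,
      show ("''" : String).toList = ['\'', '\''] from rfl,
      pvJoinEmptySep, addquoteLoop_flatten, splitOn_eq_pvSplit, List.map_map]
  rw [show String.toList ∘ String.ofList = id from funext fun l => by simp, List.map_id]
  simpa using (join_pvSplit s.toList []).symm

-- ===== VERDICT (by name: the statement is the Claim_ definition above) =====
theorem addquote_spec : Claim_equal_addquote := by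
  intro s _
  exact addquote_eq s
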